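-- pv_equiv track=rewrite | github.com/abuhasan12/automating_connect | automation_functions.py | check_flow_created_or_exists
-- ===== SOURCE A (Python) =====
-- def check_flow_created_or_exists(flow, to_flows_list, from_flows_list):
--     if any(from_flow['Name'] == flow['Name'] and from_flow['Status'] == 'Created' for from_flow in from_flows_list):
--         return True, from_flows_list
--     elif any(from_flow['Name'] == flow['Name'] and from_flow['Status'] == 'Exists' for from_flow in from_flows_list):
--         return True, from_flows_list
--     elif any(to_flow['Name'] == flow['Name'] for to_flow in to_flows_list):
--         for from_flow in from_flows_list:
--             if from_flow['Name'] == flow['Name']: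
--                 from_flow['Status'] = 'Exists'
--         return True, from_flows_list
--     return False, from_flows_list
-- ===== SOURCE B (Python) =====
-- def check_flow_created_or_exists(flow, to_flows_list, from_flows_list):
--     match_idxs = []
--     exists_seen = False
--     for i, from_flow in enumerate(from_flows_list):
--         if from_flow['Name'] == flow['Name']:
--             if from_flow['Status'] == 'Created':
--                 return True, from_flows_list
--             if from_flow['Status'] == 'Exists':
--                 exists_seen = True
--             match_idxs.append(i)
--     if exists_seen:
--         return True, from_flows_list
--     if any(to_flow['Name'] == flow['Name'] for to_flow in to_flows_list):
--         for i in match_idxs: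
--             from_flows_list[i]['Status'] = 'Exists'
--         return True, from_flows_list
--     return False, from_flows_list
-- ===== Notes on version B (the rewrite author's own statement) =====
-- stated objective: alternative
-- what changed: Replaces A's three independent scans of from_flows_list (Created-any, Exists-any, mutation loop) by ONE early-returning pass that collects matching indices and an Exists flag, then a conditional short-circuit any() over to_flows_list and targeted index updates of only the collected matches.
import Mathlib
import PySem

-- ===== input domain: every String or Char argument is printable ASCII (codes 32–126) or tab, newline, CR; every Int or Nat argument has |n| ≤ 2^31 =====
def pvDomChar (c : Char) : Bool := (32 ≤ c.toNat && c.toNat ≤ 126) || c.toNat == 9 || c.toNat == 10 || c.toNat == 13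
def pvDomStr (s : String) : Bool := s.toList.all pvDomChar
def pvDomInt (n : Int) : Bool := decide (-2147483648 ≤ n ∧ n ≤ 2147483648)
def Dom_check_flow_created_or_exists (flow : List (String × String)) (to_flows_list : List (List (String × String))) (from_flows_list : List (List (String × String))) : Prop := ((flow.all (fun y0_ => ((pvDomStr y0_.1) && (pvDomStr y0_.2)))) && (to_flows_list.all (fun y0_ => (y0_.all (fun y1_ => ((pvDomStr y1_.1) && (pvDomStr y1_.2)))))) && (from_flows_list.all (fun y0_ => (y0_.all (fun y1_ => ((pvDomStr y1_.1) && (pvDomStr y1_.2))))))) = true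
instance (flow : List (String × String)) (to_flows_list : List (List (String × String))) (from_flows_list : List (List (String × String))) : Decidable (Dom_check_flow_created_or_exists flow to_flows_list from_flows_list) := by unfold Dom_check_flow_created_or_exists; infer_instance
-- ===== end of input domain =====

-- B replaces A's three independent scans of from_flows_list by ONE early-returning pass
-- (collecting match indices and an Exists flag) plus a conditional short-circuit scan of
-- to_flows_list and targeted index updates; equivalence is about the RETURN value (both Pythons
-- also mutate from_flows_list in place in the same way).

-- d[k] with default "" (dicts are assoc lists; lookup = first match, as in Python)
def pvGetD (d : List (String × String)) (k : String) : String :=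
  PySem.Dict.getD (PySem.Dict.mk d) k ""

-- d['Status'] = 'Exists'  (overwrite keeps position, new key appends, as in Python)
def pvSetStatus (d : List (String × String)) : List (String × String) :=
  ((PySem.Dict.mk d).insert "Status" "Exists").items

-- ===== PORT A =====
def check_flow_created_or_exists (flow : List (String × String)) (to_flows_list : List (List (String × String))) (from_flows_list : List (List (String × String))) : Bool × (List (List (String × String))) :=
  let nm := pvGetD flow "Name"
  if from_flows_list.any (fun ff => pvGetD ff "Name" == nm && pvGetD ff "Status" == "Created") then
    (true, from_flows_list)
  else if from_flows_list.any (fun ff => pvGetD ff "Name" == nm && pvGetD ff "Status" == "Exists") then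
    (true, from_flows_list)
  else if to_flows_list.any (fun tf => pvGetD tf "Name" == nm) then
    -- for from_flow in from_flows_list: if Name matches, from_flow['Status'] = 'Exists'
    (true, from_flows_list.map (fun ff => if pvGetD ff "Name" == nm then pvSetStatus ff else ff))
  else
    (false, from_flows_list)

-- ===== PORT B =====
-- Source B's enumerate loop: early return on a Created match, otherwise collect the match index
-- (and an Exists flag); after the loop the conditional to_flows scan and the index updates.
def pvLoopB (nm : String) (to_flows_list fls : List (List (String × String))) :
    List (List (String × String)) → Nat → List Nat → Bool → Bool × List (List (String × String))
  | [], _, match_idxs, exists_seen =>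
      if exists_seen then (true, fls)
      else if to_flows_list.any (fun tf => pvGetD tf "Name" == nm) then
        -- for i in match_idxs: from_flows_list[i]['Status'] = 'Exists'
        (true, match_idxs.foldl (fun l i => l.modify i pvSetStatus) fls)
      else (false, fls)
  | ff :: rest, i, match_idxs, exists_seen =>
      if pvGetD ff "Name" == nm then
        if pvGetD ff "Status" == "Created" then (true, fls)
        else pvLoopB nm to_flows_list fls rest (i + 1) (match_idxs ++ [i])
               (exists_seen || (pvGetD ff "Status" == "Exists"))
      else pvLoopB nm to_flows_list fls rest (i + 1) match_idxs exists_seen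

def check_flow_created_or_exists_alt (flow : List (String × String)) (to_flows_list : List (List (String × String))) (from_flows_list : List (List (String × String))) : Bool × (List (List (String × String))) :=
  pvLoopB (pvGetD flow "Name") to_flows_list from_flows_list from_flows_list 0 [] false

-- ===== PRECONDITION & SPEC =====
-- Pre_ is EXACTLY the inputs on which the Python A returns normally (outside it A — and B,
-- whose scans read the same keys in the same order — raises KeyError).
def Pre_check_flow_created_or_exists (flow : List (String × String)) (to_flows_list : List (List (String × String))) (from_flows_list : List (List (String × String))) : Prop :=
  (from_flows_list ≠ [] → ((PySem.Dict.mk flow).get? "Name").isSome = true) ∧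
  -- the from-scan stops at the first Created match: entries up to there need 'Name', matching ones 'Status'
  (∀ i, i < from_flows_list.length →
    (∀ j, j < i →
      ¬ ((PySem.Dict.mk (from_flows_list.getD j [])).get? "Name" = (PySem.Dict.mk flow).get? "Name" ∧
         (PySem.Dict.mk (from_flows_list.getD j [])).get? "Status" = some "Created")) →
    ((PySem.Dict.mk (from_flows_list.getD i [])).get? "Name").isSome = true ∧
      ((PySem.Dict.mk (from_flows_list.getD i [])).get? "Name" = (PySem.Dict.mk flow).get? "Name" →
        ((PySem.Dict.mk (from_flows_list.getD i [])).get? "Status").isSome = true)) ∧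
  -- the to-scan runs only without a Created/Exists match and stops at the first Name match
  ((∃ ff ∈ from_flows_list, (PySem.Dict.mk ff).get? "Name" = (PySem.Dict.mk flow).get? "Name" ∧
        ((PySem.Dict.mk ff).get? "Status" = some "Created" ∨ (PySem.Dict.mk ff).get? "Status" = some "Exists")) ∨
   ((to_flows_list ≠ [] → ((PySem.Dict.mk flow).get? "Name").isSome = true) ∧
    ∀ i, i < to_flows_list.length →
      (∀ j, j < i → (PySem.Dict.mk (to_flows_list.getD j [])).get? "Name" ≠ (PySem.Dict.mk flow).get? "Name") →
      ((PySem.Dict.mk (to_flows_list.getD i [])).get? "Name").isSome = true))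
instance (flow : List (String × String)) (to_flows_list : List (List (String × String))) (from_flows_list : List (List (String × String))) : Decidable (Pre_check_flow_created_or_exists flow to_flows_list from_flows_list) := by unfold Pre_check_flow_created_or_exists; infer_instance

def pvWitness_check_flow_created_or_exists : (List (String × String)) × (List (List (String × String))) × (List (List (String × String))) :=
  ([("Name", "f")], [[("Name", "f")]], [[("Name", "f"), ("Status", "Pending")], [("Name", "g"), ("Status", "Created")]])

def Spec_check_flow_created_or_exists (flow : List (String × String)) (to_flows_list : List (List (String × String))) (from_flows_list : List (List (String × String))) (out : Bool × (List (List (String × String)))) : Prop := out = check_flow_created_or_exists_alt flow to_flows_list from_flows_list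
instance (flow : List (String × String)) (to_flows_list : List (List (String × String))) (from_flows_list : List (List (String × String))) (out : Bool × (List (List (String × String)))) : Decidable (Spec_check_flow_created_or_exists flow to_flows_list from_flows_list out) := by unfold Spec_check_flow_created_or_exists; infer_instance

-- ===== CLAIM (what is proved, stated in full; the proofs are below) =====
def Claim_equal_check_flow_created_or_exists : Prop := ∀ (flow : List (String × String)) (to_flows_list : List (List (String × String))) (from_flows_list : List (List (String × String))), Dom_check_flow_created_or_exists flow to_flows_list from_flows_list → Pre_check_flow_created_or_exists flow to_flows_list from_flows_list → Spec_check_flow_created_or_exists flow to_flows_list from_flows_list (check_flow_created_or_exists flow to_flows_list from_flows_list)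

-- ===== LEMMAS AND PROOFS =====

-- the indices (counting from i0) of the elements of xs whose 'Name' is nm
def pvIdxFilter (p : List (String × String) → Bool) : List (List (String × String)) → Nat → List Nat
  | [], _ => []
  | x :: xs, i => if p x then i :: pvIdxFilter p xs (i + 1) else pvIdxFilter p xs (i + 1)

-- characterisation of B's loop as A's if-chain over the remaining suffix
theorem pv_loopB_spec (nm : String) (to_flows_list fls : List (List (String × String)))
    (xs : List (List (String × String))) (i0 : Nat) (idxs : List Nat) (es : Bool) :
    pvLoopB nm to_flows_list fls xs i0 idxs es =
    if xs.any (fun ff => pvGetD ff "Name" == nm && pvGetD ff "Status" == "Created") then (true, fls)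
    else if es || xs.any (fun ff => pvGetD ff "Name" == nm && pvGetD ff "Status" == "Exists") then (true, fls)
    else if to_flows_list.any (fun tf => pvGetD tf "Name" == nm) then
      (true, (idxs ++ pvIdxFilter (fun ff => pvGetD ff "Name" == nm) xs i0).foldl
        (fun l i => l.modify i pvSetStatus) fls)
    else (false, fls) := by
  induction xs generalizing i0 idxs es with
  | nil => simp [pvLoopB, pvIdxFilter]
  | cons ff rest ih =>
    by_cases hn : (pvGetD ff "Name" == nm) = true
    · by_cases hc : (pvGetD ff "Status" == "Created") = true
      · simp [pvLoopB, hn, hc, List.any_cons]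
      · rw [pvLoopB, if_pos hn, if_neg hc, ih]
        simp only [List.any_cons, hn, pvIdxFilter]
        rw [Bool.not_eq_true] at hc
        simp [hc, Bool.or_assoc, List.append_assoc]
    · rw [pvLoopB, if_neg hn, ih]
      rw [Bool.not_eq_true] at hn
      simp [List.any_cons, hn, pvIdxFilter]

-- modifying a list at the position just after a prefix
theorem pv_modify_append (g : List (String × String) → List (String × String))
    (pre : List (List (String × String))) (x : List (String × String))
    (rest : List (List (String × String))) :
    (pre ++ x :: rest).modify pre.length g = pre ++ g x :: rest := by
  induction pre with
  | nil => simp [List.modify]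
  | cons a pre ih => simpa [List.modify] using ih

-- folding the per-index update over the match indices is the match-conditional map
theorem pv_apply_idxs (p : List (String × String) → Bool)
    (g : List (String × String) → List (String × String))
    (xs pre : List (List (String × String))) :
    (pvIdxFilter p xs pre.length).foldl (fun l i => l.modify i g) (pre ++ xs)
    = pre ++ xs.map (fun x => if p x then g x else x) := by
  induction xs generalizing pre with
  | nil => simp [pvIdxFilter]
  | cons x xs ih =>
    simp only [pvIdxFilter, List.map_cons]
    by_cases h : p x = true
    · simp only [h, if_pos, List.foldl_cons]
      rw [pv_modify_append]
      have : pre ++ g x :: xs = (pre ++ [g x]) ++ xs := by simp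
      rw [this]
      have hlen : pre.length + 1 = (pre ++ [g x]).length := by simp
      rw [hlen, ih (pre ++ [g x])]
      simp
    · simp only [if_neg h]
      have : pre ++ x :: xs = (pre ++ [x]) ++ xs := by simp
      rw [this]
      have hlen : pre.length + 1 = (pre ++ [x]).length := by simp
      rw [hlen, ih (pre ++ [x])]
      simp

theorem pv_main (flow : List (String × String)) (to_flows_list : List (List (String × String))) (from_flows_list : List (List (String × String))) :
    check_flow_created_or_exists flow to_flows_list from_flows_list
    = check_flow_created_or_exists_alt flow to_flows_list from_flows_list := by
  unfold check_flow_created_or_exists check_flow_created_or_exists_alt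
  rw [pv_loopB_spec]
  have happ := pv_apply_idxs (fun ff => pvGetD ff "Name" == pvGetD flow "Name") pvSetStatus from_flows_list []
  simp only [List.length_nil, List.nil_append] at happ
  simp only [Bool.false_or, List.nil_append, happ]

-- ===== VERDICT (by name: the statement is the Claim_ definition above) =====
theorem check_flow_created_or_exists_spec : Claim_equal_check_flow_created_or_exists := by
  intro flow to_flows_list from_flows_list _ _
  unfold Spec_check_flow_created_or_exists
  exact pv_main flow to_flows_list from_flows_list
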